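-- pv_equiv track=rewrite | github.com/iamez/slomix | scripts/backfill_vs_stats_subjects.py | match_block_to_subject
-- ===== SOURCE A (Python) =====
-- def guid_matches(short_guid: str, long_guid: str) -> bool:
--     """Check if a short GUID (8-char from PCS) matches a long GUID (32-char from CE)."""
--     return long_guid.upper().startswith(short_guid.upper())
--
-- def find_ce_kills_for_guid(ce_matrix: dict, short_guid: str) -> dict:
--     """Find CE kills for a short GUID by prefix-matching against full CE GUIDs."""
--     for full_guid, kills in ce_matrix.items():
--         if guid_matches(short_guid, full_guid):
--             return kills
--     return {}
--
-- def find_ce_kill_count(ce_kills: dict, short_opp_guid: str) -> int: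
--     """Find kill count against opponent by prefix-matching GUID."""
--     for full_guid, count in ce_kills.items():
--         if guid_matches(short_opp_guid, full_guid):
--             return count
--     return 0
--
-- def match_block_to_subject(block_rows, team_comp, ce_matrix, subject_team_players):
--     """Match a block to a specific subject using CE kill matrix.
--
--     Returns (subject_name, subject_guid, confidence) or None.
--     """
--     # Build block's kill signature: {opponent_name: kills}
--     block_kills = {}
--     for _, opponent_name, kills, deaths in block_rows:
--         block_kills[opponent_name] = kills
--
--     # Convert opponent names to short GUIDs
--     block_kills_by_guid = {}
--     for opp_name, kills in block_kills.items():
--         opp_info = team_comp.get(opp_name)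
--         if opp_info is None:
--             for tc_name, tc_info in team_comp.items():
--                 if tc_name.lower() == opp_name.lower():
--                     opp_info = tc_info
--                     break
--         if opp_info:
--             block_kills_by_guid[opp_info[0]] = kills  # short guid -> kills
--
--     # Try each candidate subject
--     best_match = None
--     best_score = -1
--
--     for subj_name, subj_guid in subject_team_players:
--         ce_kills = find_ce_kills_for_guid(ce_matrix, subj_guid)
--
--         # Compare kill counts
--         match_score = 0
--         mismatch = False
--
--         for opp_short_guid, expected_kills in block_kills_by_guid.items():
--             actual_kills = find_ce_kill_count(ce_kills, opp_short_guid)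
--             if actual_kills == expected_kills:
--                 match_score += 1
--             else:
--                 mismatch = True
--                 break
--
--         if not mismatch and match_score > best_score:
--             best_score = match_score
--             best_match = (subj_name, subj_guid, match_score)
--
--     return best_match
-- ===== SOURCE B (Python) =====
-- def guid_matches(short_guid: str, long_guid: str) -> bool:
--     """Check if a short GUID (8-char from PCS) matches a long GUID (32-char from CE)."""
--     return long_guid.upper().startswith(short_guid.upper())
--
-- def find_ce_kills_for_guid(ce_matrix: dict, short_guid: str) -> dict:
--     for full_guid, kills in ce_matrix.items():
--         if guid_matches(short_guid, full_guid):
--             return kills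
--     return {}
--
-- def find_ce_kill_count(ce_kills: dict, short_opp_guid: str) -> int:
--     for full_guid, count in ce_kills.items():
--         if guid_matches(short_opp_guid, full_guid):
--             return count
--     return 0
--
-- def _ci_team_info(team_comp, opp_name):
--     """team_comp[opp_name], falling back to the first case-insensitive key match."""
--     info = team_comp.get(opp_name)
--     if info is None:
--         low = opp_name.lower()
--         info = next((tc_info for tc_name, tc_info in team_comp.items()
--                      if tc_name.lower() == low), None)
--     return info
--
-- def match_block_to_subject(block_rows, team_comp, ce_matrix, subject_team_players):
--     """Match a block to a specific subject using CE kill matrix.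
--
--     Returns (subject_name, subject_guid, confidence) or None.
--     A subject either mismatches or matches the whole signature, so the answer is
--     the FIRST subject whose CE kill counts equal the signature exactly.
--     """
--     block_kills = {}
--     for _, opponent_name, kills, _deaths in block_rows:
--         block_kills[opponent_name] = kills
--
--     sig = {}
--     for opp_name, kills in block_kills.items():
--         info = _ci_team_info(team_comp, opp_name)
--         if info:
--             sig[info[0]] = kills
--
--     required = len(sig)
--     for subj_name, subj_guid in subject_team_players:
--         ce_kills = find_ce_kills_for_guid(ce_matrix, subj_guid)
--         if all(find_ce_kill_count(ce_kills, g) == k for g, k in sig.items()):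
--             return (subj_name, subj_guid, required)
--     return None
-- ===== Notes on version B (the rewrite author's own statement) =====
-- stated objective: simpler
-- what changed: A subject either mismatches or matches the whole signature, so B drops A's best_score/best_match accumulation and returns the first subject whose CE kill counts equal every signature entry, with confidence = len(signature).
import Mathlib
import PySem

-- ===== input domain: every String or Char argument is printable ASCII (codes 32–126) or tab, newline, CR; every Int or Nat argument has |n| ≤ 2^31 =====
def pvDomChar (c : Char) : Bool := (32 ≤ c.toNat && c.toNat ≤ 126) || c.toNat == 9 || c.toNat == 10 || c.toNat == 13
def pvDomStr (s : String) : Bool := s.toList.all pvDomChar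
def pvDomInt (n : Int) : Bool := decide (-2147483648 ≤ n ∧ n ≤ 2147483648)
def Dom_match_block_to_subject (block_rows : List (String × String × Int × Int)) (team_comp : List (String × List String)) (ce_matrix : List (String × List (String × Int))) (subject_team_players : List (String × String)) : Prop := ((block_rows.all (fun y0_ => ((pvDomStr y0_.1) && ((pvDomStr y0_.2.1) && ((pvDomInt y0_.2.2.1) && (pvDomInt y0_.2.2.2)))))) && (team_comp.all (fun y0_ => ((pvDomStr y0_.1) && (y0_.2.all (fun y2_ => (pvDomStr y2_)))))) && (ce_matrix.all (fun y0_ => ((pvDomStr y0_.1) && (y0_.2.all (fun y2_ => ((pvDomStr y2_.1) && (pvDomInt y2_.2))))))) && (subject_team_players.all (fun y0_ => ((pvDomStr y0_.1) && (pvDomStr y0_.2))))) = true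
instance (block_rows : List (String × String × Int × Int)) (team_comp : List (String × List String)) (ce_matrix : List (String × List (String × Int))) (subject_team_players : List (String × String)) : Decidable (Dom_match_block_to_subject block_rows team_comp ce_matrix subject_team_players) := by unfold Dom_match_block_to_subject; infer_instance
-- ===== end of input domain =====

-- B replaces A's best_score/best_match accumulation by returning the FIRST subject whose
-- whole signature matches, with confidence = size of the signature (objective: simpler).

-- ===== PORT A =====
-- shared module helpers (identical in Source A and Source B)
def guid_matches (short_guid long_guid : String) : Bool :=
  PySem.Str.startswith (PySem.Str.upper long_guid) (PySem.Str.upper short_guid)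

def find_ce_kills_for_guid (ce_items : List (String × PySem.Dict String Int)) (short_guid : String) : PySem.Dict String Int :=
  match ce_items with
  | [] => PySem.Dict.empty
  | (full_guid, kills) :: t =>
      if guid_matches short_guid full_guid then kills else find_ce_kills_for_guid t short_guid

def find_ce_kill_count (ce_kills_items : List (String × Int)) (short_opp_guid : String) : Int :=
  match ce_kills_items with
  | [] => 0
  | (full_guid, count) :: t =>
      if guid_matches short_opp_guid full_guid then count else find_ce_kill_count t short_opp_guid

-- the case-insensitive fallback loop 'for tc_name, tc_info in team_comp.items(): …'
def ci_fallback (items : List (String × List String)) (low : String) : Option (List String) :=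
  match items with
  | [] => none
  | (tc_name, tc_info) :: t =>
      if PySem.Str.lower tc_name == low then some tc_info else ci_fallback t low

-- one step of A's 'for opp_name, kills in block_kills.items(): …' signature-building loop
def a_sig_step (team : PySem.Dict String (List String)) (d : PySem.Dict String Int) (p : String × Int) : PySem.Dict String Int :=
  let opp_info : Option (List String) :=
    match team.get? p.1 with
    | some i => some i
    | none => ci_fallback team.items (PySem.Str.lower p.1)
  match opp_info with
  | some (g :: _) => d.insert g p.2   -- 'if opp_info:' — only a nonempty list is truthy
  | _ => d

-- the inner 'for opp_short_guid, expected_kills in block_kills_by_guid.items(): …' loop of A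
def a_score_loop (ce_kills : PySem.Dict String Int) (sig_items : List (String × Int)) (match_score : Int) : Int × Bool :=
  match sig_items with
  | [] => (match_score, false)
  | (g, k) :: t =>
      if find_ce_kill_count ce_kills.items g == k then a_score_loop ce_kills t (match_score + 1)
      else (match_score, true)

-- A's 'for subj_name, subj_guid in subject_team_players: …' with best_match/best_score state
def a_subject_loop (ce_items : List (String × PySem.Dict String Int)) (sig_items : List (String × Int))
    (subs : List (String × String)) (best_match : Option (String × String × Int)) (best_score : Int) :
    Option (String × String × Int) :=
  match subs with
  | [] => best_match
  | (subj_name, subj_guid) :: t =>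
      let ce_kills := find_ce_kills_for_guid ce_items subj_guid
      let r := a_score_loop ce_kills sig_items 0
      if !r.2 && decide (r.1 > best_score) then
        a_subject_loop ce_items sig_items t (some (subj_name, subj_guid, r.1)) r.1
      else
        a_subject_loop ce_items sig_items t best_match best_score

def match_block_to_subject (block_rows : List (String × String × Int × Int)) (team_comp : List (String × List String)) (ce_matrix : List (String × List (String × Int))) (subject_team_players : List (String × String)) : Option (String × String × Int) :=
  let team : PySem.Dict String (List String) := PySem.Dict.ofList team_comp
  let ce : PySem.Dict String (PySem.Dict String Int) :=
    PySem.Dict.ofList (ce_matrix.map (fun p => (p.1, PySem.Dict.ofList p.2)))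
  let block_kills : PySem.Dict String Int :=
    block_rows.foldl (fun d r => d.insert r.2.1 r.2.2.1) PySem.Dict.empty
  let block_kills_by_guid : PySem.Dict String Int :=
    block_kills.items.foldl (a_sig_step team) PySem.Dict.empty
  a_subject_loop ce.items block_kills_by_guid.items subject_team_players none (-1)

-- ===== PORT B =====
-- Source B's _ci_team_info helper
def ci_team_info (team : PySem.Dict String (List String)) (opp_name : String) : Option (List String) :=
  match team.get? opp_name with
  | some i => some i
  | none => ci_fallback team.items (PySem.Str.lower opp_name)

-- one step of Source B's signature-building loop ('if info:' — None and [] are both falsy)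
def b_sig_step (team : PySem.Dict String (List String)) (d : PySem.Dict String Int) (p : String × Int) : PySem.Dict String Int :=
  match (ci_team_info team p.1).getD [] with
  | g :: _ => d.insert g p.2
  | [] => d

-- Source B's 'for subj_name, subj_guid in subject_team_players: … return first full match'
def b_subject_loop (ce_items : List (String × PySem.Dict String Int)) (sig_items : List (String × Int))
    (required : Int) (subs : List (String × String)) : Option (String × String × Int) :=
  match subs with
  | [] => none
  | (subj_name, subj_guid) :: t =>
      let ce_kills := find_ce_kills_for_guid ce_items subj_guid
      if sig_items.all (fun p => find_ce_kill_count ce_kills.items p.1 == p.2) then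
        some (subj_name, subj_guid, required)
      else
        b_subject_loop ce_items sig_items required t

def match_block_to_subject_alt (block_rows : List (String × String × Int × Int)) (team_comp : List (String × List String)) (ce_matrix : List (String × List (String × Int))) (subject_team_players : List (String × String)) : Option (String × String × Int) :=
  let team : PySem.Dict String (List String) := PySem.Dict.ofList team_comp
  let ce : PySem.Dict String (PySem.Dict String Int) :=
    PySem.Dict.ofList (ce_matrix.map (fun p => (p.1, PySem.Dict.ofList p.2)))
  let block_kills : PySem.Dict String Int :=
    block_rows.foldl (fun d r => d.insert r.2.1 r.2.2.1) PySem.Dict.empty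
  let sig : PySem.Dict String Int :=
    block_kills.items.foldl (b_sig_step team) PySem.Dict.empty
  b_subject_loop ce.items sig.items (sig.items.length : Int) subject_team_players

-- ===== PRECONDITION & SPEC =====
def Spec_match_block_to_subject (block_rows : List (String × String × Int × Int)) (team_comp : List (String × List String)) (ce_matrix : List (String × List (String × Int))) (subject_team_players : List (String × String)) (out : Option (String × String × Int)) : Prop := out = match_block_to_subject_alt block_rows team_comp ce_matrix subject_team_players
instance (block_rows : List (String × String × Int × Int)) (team_comp : List (String × List String)) (ce_matrix : List (String × List (String × Int))) (subject_team_players : List (String × String)) (out : Option (String × String × Int)) : Decidable (Spec_match_block_to_subject block_rows team_comp ce_matrix subject_team_players out) := by unfold Spec_match_block_to_subject; infer_instance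

-- ===== CLAIM (what is proved, stated in full; the proofs are below) =====
def Claim_equal_match_block_to_subject : Prop := ∀ (block_rows : List (String × String × Int × Int)) (team_comp : List (String × List String)) (ce_matrix : List (String × List (String × Int))) (subject_team_players : List (String × String)), Dom_match_block_to_subject block_rows team_comp ce_matrix subject_team_players → Spec_match_block_to_subject block_rows team_comp ce_matrix subject_team_players (match_block_to_subject block_rows team_comp ce_matrix subject_team_players)

-- ===== LEMMAS AND PROOFS =====

-- A's inline signature-building step equals B's step through _ci_team_info/truthiness.
theorem sig_step_eq (team : PySem.Dict String (List String)) (d : PySem.Dict String Int) (p : String × Int) :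
    a_sig_step team d p = b_sig_step team d p := by
  unfold a_sig_step b_sig_step
  rcases h : PySem.Dict.get? team p.1 with _ | i
  · simp only [ci_team_info, h]
    rcases o : ci_fallback team.items (PySem.Str.lower p.1) with _ | info
    · simp
    · rcases info with _ | ⟨g, t⟩ <;> simp
  · simp only [ci_team_info, h]
    rcases i with _ | ⟨g, t⟩ <;> simp

-- hence the whole signature dictionaries coincide
theorem sig_fold_eq (team : PySem.Dict String (List String)) (l : List (String × Int)) :
    l.foldl (a_sig_step team) PySem.Dict.empty = l.foldl (b_sig_step team) PySem.Dict.empty := by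
  congr 1
  funext d p
  exact sig_step_eq team d p

-- If every signature entry matches, A's inner loop counts them all and reports no mismatch.
theorem a_score_loop_of_all (c : PySem.Dict String Int) (sig : List (String × Int)) (acc : Int)
    (h : sig.all (fun p => find_ce_kill_count c.items p.1 == p.2) = true) :
    a_score_loop c sig acc = (acc + sig.length, false) := by
  induction sig generalizing acc with
  | nil => simp [a_score_loop]
  | cons x t ih =>
      simp only [List.all_cons, Bool.and_eq_true] at h
      simp only [a_score_loop, h.1, if_true]
      rw [ih _ h.2]
      simp only [List.length_cons]
      congr 1
      push_cast
      ring

-- If some signature entry mismatches, A's inner loop reports mismatch = true.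
theorem a_score_loop_of_not_all (c : PySem.Dict String Int) (sig : List (String × Int)) (acc : Int)
    (h : sig.all (fun p => find_ce_kill_count c.items p.1 == p.2) = false) :
    (a_score_loop c sig acc).2 = true := by
  induction sig generalizing acc with
  | nil => simp at h
  | cons x t ih =>
      rcases x with ⟨g, k⟩
      by_cases hx : (find_ce_kill_count c.items g == k) = true
      · simp only [List.all_cons, hx, Bool.true_and] at h
        simp only [a_score_loop, hx, if_true]
        exact ih _ h
      · simp only [Bool.not_eq_true] at hx
        simp [a_score_loop, hx]

-- Once best_score has reached the full signature length, A's loop never updates again.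
theorem a_subject_loop_saturated (c : List (String × PySem.Dict String Int)) (sig : List (String × Int))
    (subs : List (String × String)) (best : Option (String × String × Int)) :
    a_subject_loop c sig subs best (sig.length : Int) = best := by
  induction subs generalizing best with
  | nil => rfl
  | cons s t ih =>
      rcases s with ⟨n, g⟩
      by_cases hall : sig.all (fun p => find_ce_kill_count (find_ce_kills_for_guid c g).items p.1 == p.2) = true
      · simp only [a_subject_loop, a_score_loop_of_all _ _ _ hall]
        have : ¬ ((0 : Int) + sig.length > (sig.length : Int)) := by omega
        simp [ih]
      · have hm := a_score_loop_of_not_all (find_ce_kills_for_guid c g) sig 0 (by simpa using hall)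
        simp only [a_subject_loop, hm]
        simp [ih]

-- From the initial state (None, -1), A's loop returns the first fully matching subject
-- with score = |signature| — exactly B's loop.
theorem a_loop_eq_b_loop (c : List (String × PySem.Dict String Int)) (sig : List (String × Int))
    (subs : List (String × String)) :
    a_subject_loop c sig subs none (-1) = b_subject_loop c sig (sig.length : Int) subs := by
  induction subs with
  | nil => rfl
  | cons s t ih =>
      rcases s with ⟨n, g⟩
      by_cases hall : sig.all (fun p => find_ce_kill_count (find_ce_kills_for_guid c g).items p.1 == p.2) = true
      · simp only [a_subject_loop, b_subject_loop, a_score_loop_of_all _ _ _ hall, hall, if_true]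
        have : (0 : Int) + sig.length > -1 := by omega
        simp only [this, decide_true, Bool.not_false, Bool.true_and, if_true]
        have := a_subject_loop_saturated c sig t (some (n, g, (0 : Int) + sig.length))
        simp only [zero_add] at this ⊢
        exact this
      · have hm := a_score_loop_of_not_all (find_ce_kills_for_guid c g) sig 0 (by simpa using hall)
        simp only [a_subject_loop, b_subject_loop, hm, hall]
        simpa using ih

-- ===== VERDICT (by name: the statement is the Claim_ definition above) =====
theorem match_block_to_subject_spec : Claim_equal_match_block_to_subject := by
  intro block_rows team_comp ce_matrix subject_team_players _
  unfold Spec_match_block_to_subject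
  show a_subject_loop
      (PySem.Dict.ofList (ce_matrix.map (fun p => (p.1, PySem.Dict.ofList p.2)))).items
      ((block_rows.foldl (fun d r => d.insert r.2.1 r.2.2.1) PySem.Dict.empty).items.foldl
        (a_sig_step (PySem.Dict.ofList team_comp)) PySem.Dict.empty).items
      subject_team_players none (-1)
    = b_subject_loop
      (PySem.Dict.ofList (ce_matrix.map (fun p => (p.1, PySem.Dict.ofList p.2)))).items
      ((block_rows.foldl (fun d r => d.insert r.2.1 r.2.2.1) PySem.Dict.empty).items.foldl
        (b_sig_step (PySem.Dict.ofList team_comp)) PySem.Dict.empty).items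
      (((block_rows.foldl (fun d r => d.insert r.2.1 r.2.2.1) PySem.Dict.empty).items.foldl
        (b_sig_step (PySem.Dict.ofList team_comp)) PySem.Dict.empty).items.length : Int)
      subject_team_players
  rw [sig_fold_eq]
  exact a_loop_eq_b_loop _ _ _
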